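-- pv_equiv track=rewrite | github.com/jrcks/Nebby | analysis/websites/train_model.py | getCoeff
-- ===== SOURCE A (Python) =====
-- def getCoeff(cc_coeff):
--     vals = {}
--     degree = 0
--     for cc in cc_coeff:
--         coeff = cc_coeff[cc]
--         if cc not in vals :
--             vals[cc] = {}
--         for trace in coeff:
--             i = 1
--             for feature in trace:
--                 if i not in vals[cc]:
--                     vals[cc][i] = []
--                 vals[cc][i].append(feature)
--                 i+=1
--     return vals
-- ===== SOURCE B (Python) =====
-- def getCoeff(cc_coeff):
--     vals = {}
--     for cc in cc_coeff:
--         traces = cc_coeff[cc]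
--         max_len = 0
--         for t in traces:
--             if len(t) > max_len:
--                 max_len = len(t)
--         vals[cc] = {i: [t[i - 1] for t in traces if len(t) >= i]
--                     for i in range(1, max_len + 1)}
--     return vals
-- ===== Notes on version B (the rewrite author's own statement) =====
-- stated objective: alternative
-- what changed: B regroups each key's traces column-major: it computes the maximum trace length once and builds the inner dict with one comprehension per index (collecting the i-th feature of every long-enough trace), instead of A's row-major per-feature appends with membership tests; Pre_ excludes association lists with duplicate keys, which cannot occur in A's Python dict argument.
import Mathlib
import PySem

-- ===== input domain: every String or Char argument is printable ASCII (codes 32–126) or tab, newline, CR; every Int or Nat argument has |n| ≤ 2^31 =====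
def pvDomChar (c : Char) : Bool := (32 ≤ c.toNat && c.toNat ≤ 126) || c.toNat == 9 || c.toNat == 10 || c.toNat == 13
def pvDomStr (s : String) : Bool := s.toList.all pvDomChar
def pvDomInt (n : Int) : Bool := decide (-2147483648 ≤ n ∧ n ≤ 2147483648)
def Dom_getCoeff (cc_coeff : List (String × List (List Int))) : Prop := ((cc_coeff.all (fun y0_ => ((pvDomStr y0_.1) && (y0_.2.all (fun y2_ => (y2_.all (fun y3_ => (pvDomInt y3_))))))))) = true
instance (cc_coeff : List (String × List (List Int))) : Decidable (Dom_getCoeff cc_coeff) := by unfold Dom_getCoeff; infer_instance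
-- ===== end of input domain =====

-- B regroups each key's traces column-major (one list comprehension per index, after computing
-- the maximum trace length) instead of A's row-major per-feature appends; same nested dict.

-- ===== PORT A =====
-- literal port of A: vals/degree loop; `for cc in cc_coeff` iterates the dict's keys and
-- `cc_coeff[cc]` is the (first-match) lookup; the trailing .map converts the nested dicts
-- to the association-list return type.
def getCoeff (cc_coeff : List (String × List (List Int))) : List (String × List (Int × List Int)) :=
  let src : PySem.Dict String (List (List Int)) := PySem.Dict.mk cc_coeff
  let vals : PySem.Dict String (PySem.Dict Int (List Int)) :=
    cc_coeff.foldl (fun vals p =>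
      let cc := p.1
      let coeff := src.getD cc []
      let vals := if vals.contains cc then vals else vals.insert cc PySem.Dict.empty
      coeff.foldl (fun vals trace =>
        (trace.foldl (fun (st : PySem.Dict String (PySem.Dict Int (List Int)) × Int) feature =>
            let d0 := st.1.getD cc PySem.Dict.empty
            let d1 := if d0.contains st.2 then d0 else d0.insert st.2 []
            let d2 := d1.modify st.2 [] (fun l => l ++ [feature])
            (st.1.insert cc d2, st.2 + 1)) (vals, (1 : Int))).1) vals)
      PySem.Dict.empty
  vals.items.map (fun q => (q.1, q.2.items))

-- ===== PORT B =====
-- literal port of Source B: per key, the max-length loop, then the dict comprehension over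
-- range(1, max_len+1) with [t[i-1] for t in traces if len(t) >= i].
def getCoeff_alt (cc_coeff : List (String × List (List Int))) : List (String × List (Int × List Int)) :=
  let src : PySem.Dict String (List (List Int)) := PySem.Dict.mk cc_coeff
  let vals : PySem.Dict String (PySem.Dict Int (List Int)) :=
    cc_coeff.foldl (fun vals p =>
      let cc := p.1
      let traces := src.getD cc []
      let maxLen : Int := traces.foldl (fun m t => if (t.length : Int) > m then (t.length : Int) else m) 0
      vals.insert cc (PySem.Dict.mk ((PySem.List.pyRange 1 (maxLen + 1) 1).map (fun i =>
        (i, (traces.filter (fun t => i ≤ (t.length : Int))).map (fun t => PySem.List.pyGetD t (i - 1) 0))))))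
      PySem.Dict.empty
  vals.items.map (fun q => (q.1, q.2.items))

-- ===== PRECONDITION & SPEC =====
-- Pre_ excludes association lists with duplicate keys: A's Python argument is a dict, which
-- cannot contain a key twice, so no Python input is excluded.
def Pre_getCoeff (cc_coeff : List (String × List (List Int))) : Prop :=
  (cc_coeff.map Prod.fst).Nodup
instance (cc_coeff : List (String × List (List Int))) : Decidable (Pre_getCoeff cc_coeff) := by
  unfold Pre_getCoeff; infer_instance
def pvWitness_getCoeff : (List (String × List (List Int))) :=
  [("a", [[1, 2], [3]]), ("b", [])]
def Spec_getCoeff (cc_coeff : List (String × List (List Int))) (out : List (String × List (Int × List Int))) : Prop := out = getCoeff_alt cc_coeff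
instance (cc_coeff : List (String × List (List Int))) (out : List (String × List (Int × List Int))) : Decidable (Spec_getCoeff cc_coeff out) := by unfold Spec_getCoeff; infer_instance

-- ===== CLAIM (what is proved, stated in full; the proofs are below) =====
def Claim_equal_getCoeff : Prop := ∀ (cc_coeff : List (String × List (List Int))), Dom_getCoeff cc_coeff → Pre_getCoeff cc_coeff → Spec_getCoeff cc_coeff (getCoeff cc_coeff)

-- ===== LEMMAS AND PROOFS =====

-- A's loop bodies and B's loop body, as named copies of the ports' lambdas
def bodyA (src : PySem.Dict String (List (List Int)))
    (vals : PySem.Dict String (PySem.Dict Int (List Int))) (p : String × List (List Int)) :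
    PySem.Dict String (PySem.Dict Int (List Int)) :=
  (src.getD p.1 []).foldl (fun vals trace =>
    (trace.foldl (fun (st : PySem.Dict String (PySem.Dict Int (List Int)) × Int) feature =>
        let d0 := st.1.getD p.1 PySem.Dict.empty
        let d1 := if d0.contains st.2 then d0 else d0.insert st.2 []
        let d2 := d1.modify st.2 [] (fun l => l ++ [feature])
        (st.1.insert p.1 d2, st.2 + 1)) (vals, (1 : Int))).1)
    (if vals.contains p.1 then vals else vals.insert p.1 PySem.Dict.empty)

def bodyB (src : PySem.Dict String (List (List Int)))
    (vals : PySem.Dict String (PySem.Dict Int (List Int))) (p : String × List (List Int)) :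
    PySem.Dict String (PySem.Dict Int (List Int)) :=
  vals.insert p.1 (PySem.Dict.mk ((PySem.List.pyRange 1
      (((src.getD p.1 []).foldl (fun m t => if (t.length : Int) > m then (t.length : Int) else m) 0) + 1) 1).map (fun i =>
    (i, ((src.getD p.1 []).filter (fun t => i ≤ (t.length : Int))).map (fun t => PySem.List.pyGetD t (i - 1) 0)))))

-- the one-feature update A performs: create vals[cc][i] if missing, then append
def ins1 (d : PySem.Dict Int (List Int)) (i : Int) (x : Int) : PySem.Dict Int (List Int) :=
  (if d.contains i then d else d.insert i []).modify i [] (fun l => l ++ [x])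

-- A's inner trace loop, localized to the inner dict
def posF : PySem.Dict Int (List Int) → Int → List Int → PySem.Dict Int (List Int)
  | d, _, [] => d
  | d, i, x :: s => posF (ins1 d i x) (i + 1) s

-- maximum trace length (Nat form of B's max_len loop)
def Mx (ts : List (List Int)) : Nat := ts.foldl (fun m t => max m t.length) 0

-- column i (1-based) of a list of traces, exactly B's comprehension
def col (ts : List (List Int)) (i : Int) : List Int :=
  (ts.filter (fun t => i ≤ (t.length : Int))).map (fun t => PySem.List.pyGetD t (i - 1) 0)

-- B's per-key inner dict
def colD (ts : List (List Int)) : PySem.Dict Int (List Int) :=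
  PySem.Dict.mk ((PySem.List.pyRange 1 ((Mx ts : Int) + 1) 1).map (fun i => (i, col ts i)))

theorem maxfold (ts : List (List Int)) (m : Nat) :
    ts.foldl (fun m t => if (t.length : Int) > m then (t.length : Int) else m) (m : Int)
      = ((ts.foldl (fun m t => max m t.length) m : Nat) : Int) := by
  induction ts generalizing m with
  | nil => rfl
  | cons t ts ih =>
    simp only [List.foldl_cons]
    have h : (if (t.length : Int) > (m : Int) then (t.length : Int) else (m : Int))
        = ((max m t.length : Nat) : Int) := by
      split_ifs with h <;> push_cast at h ⊢ <;> omega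
    rw [h, ih]

theorem Mx_start_le (ts : List (List Int)) (m : Nat) :
    m ≤ ts.foldl (fun m t => max m t.length) m := by
  induction ts generalizing m with
  | nil => simp
  | cons u us ih =>
    simp only [List.foldl_cons]
    exact le_trans (Nat.le_max_left m u.length) (ih (max m u.length))

theorem len_le_fold (ts : List (List Int)) (m : Nat) (t : List Int) (h : t ∈ ts) :
    t.length ≤ ts.foldl (fun m t => max m t.length) m := by
  induction ts generalizing m with
  | nil => cases h
  | cons u us ih =>
    simp only [List.foldl_cons]
    rcases List.mem_cons.1 h with rfl | h
    · exact le_trans (Nat.le_max_right m t.length) (Mx_start_le us _)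
    · exact ih _ h

theorem len_le_Mx (ts : List (List Int)) (t : List Int) (h : t ∈ ts) : t.length ≤ Mx ts :=
  len_le_fold ts 0 t h

theorem Mx_append (us : List (List Int)) (p : List Int) :
    Mx (us ++ [p]) = max (Mx us) p.length := by
  simp [Mx, List.foldl_append]

theorem keys_colD (ts : List (List Int)) :
    (colD ts).keys = PySem.List.pyRange 1 ((Mx ts : Int) + 1) 1 := by
  simp only [colD, PySem.Dict.keys, List.map_map]
  have h : ((fun x : Int × List Int => x.1) ∘ fun i => (i, col ts i)) = id := rfl
  rw [h, List.map_id]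

theorem getD_colD (ts : List (List Int)) (i : Int) (h1 : 1 ≤ i) (h2 : i ≤ (Mx ts : Int)) :
    (colD ts).getD i ([] : List Int) = col ts i := by
  refine PySem.Dict.getD_of_mem_items (colD ts)
    (List.mem_map_of_mem ((PySem.List.mem_pyRange_one).2 ⟨h1, by omega⟩))
    (by rw [keys_colD]; exact PySem.List.nodup_pyRange_one 1 _) []

theorem col_append_last (us : List (List Int)) (ps : List (List Int)) (i : Int) :
    col (us ++ ps) i = col us i ++ col ps i := by
  simp [col]

theorem col_single_le (p : List Int) (i : Int) (h2 : i ≤ (p.length : Int)) :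
    col [p] i = [PySem.List.pyGetD p (i - 1) 0] := by
  simp [col, h2]

theorem col_single_gt (p : List Int) (i : Int) (h : (p.length : Int) < i) :
    col [p] i = [] := by
  simp [col]; omega

theorem col_gt_max (ts : List (List Int)) (i : Int) (h : (Mx ts : Int) < i) : col ts i = [] := by
  unfold col
  rw [List.filter_eq_nil_iff.mpr]
  · rfl
  · intro t ht
    have := len_le_Mx ts t ht
    simp; omega

theorem pyGetD_append_left (p : List Int) (x : Int) (j : Int) (h1 : 0 ≤ j) (h2 : j < (p.length : Int)) :
    PySem.List.pyGetD (p ++ [x]) j 0 = PySem.List.pyGetD p j 0 := by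
  rw [PySem.List.pyGetD_eq_getElem (p ++ [x]) 0 h1 (by simp; omega),
    PySem.List.pyGetD_eq_getElem p 0 h1 (by exact_mod_cast h2)]
  exact List.getElem_append_left (by omega)

theorem pyGetD_append_right (p : List Int) (x : Int) :
    PySem.List.pyGetD (p ++ [x]) (p.length : Int) 0 = x := by
  rw [PySem.List.pyGetD_eq_getElem (p ++ [x]) 0 (by positivity) (by simp)]
  simp

theorem col_snoc_ne (us : List (List Int)) (p : List Int) (x : Int) (i : Int)
    (h1 : 1 ≤ i) (hne : i ≠ (p.length : Int) + 1) :
    col (us ++ [p ++ [x]]) i = col (us ++ [p]) i := by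
  rw [col_append_last, col_append_last]
  congr 1
  by_cases hle : i ≤ (p.length : Int)
  · rw [col_single_le p i hle, col_single_le (p ++ [x]) i (by simp; omega)]
    rw [pyGetD_append_left p x (i - 1) (by omega) (by omega)]
  · rw [col_single_gt p i (by omega), col_single_gt (p ++ [x]) i (by simp; omega)]

theorem col_snoc_eq (us : List (List Int)) (p : List Int) (x : Int) :
    col (us ++ [p ++ [x]]) ((p.length : Int) + 1) = col (us ++ [p]) ((p.length : Int) + 1) ++ [x] := by
  rw [col_append_last, col_append_last]
  rw [col_single_gt p _ (by omega), col_single_le (p ++ [x]) _ (by simp)]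
  rw [List.append_nil]
  congr 2
  have h : (p.length : Int) + 1 - 1 = (p.length : Int) := by omega
  rw [h, pyGetD_append_right]

theorem col_snoc_base (us : List (List Int)) (p : List Int) (h : Mx us ≤ p.length) :
    col (us ++ [p]) ((p.length : Int) + 1) = [] := by
  rw [col_append_last, col_gt_max us _ (by omega), col_single_gt p _ (by omega)]
  rfl

theorem key_step (us : List (List Int)) (p : List Int) (x : Int) :
    ins1 (colD (us ++ [p])) ((p.length : Int) + 1) x = colD (us ++ [p ++ [x]]) := by
  have hM : Mx (us ++ [p]) = max (Mx us) p.length := Mx_append us p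
  have hM' : Mx (us ++ [p ++ [x]]) = max (Mx us) (p.length + 1) := by
    rw [Mx_append]; simp
  by_cases hcase : p.length + 1 ≤ Mx us
  · -- the index already exists: modify in place
    have hcont : (colD (us ++ [p])).contains ((p.length : Int) + 1) = true := by
      refine (PySem.Dict.contains_iff_mem_keys _ _).2 ?_
      rw [keys_colD]
      exact PySem.List.mem_pyRange_one.2 ⟨by omega, by omega⟩
    have hgd : (colD (us ++ [p])).getD ((p.length : Int) + 1) [] = col (us ++ [p]) ((p.length : Int) + 1) :=
      getD_colD _ _ (by omega) (by rw [hM]; push_cast; omega)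
    have h1 : ins1 (colD (us ++ [p])) ((p.length : Int) + 1) x
        = (colD (us ++ [p])).insert ((p.length : Int) + 1)
            (col (us ++ [p]) ((p.length : Int) + 1) ++ [x]) := by
      unfold ins1
      rw [hcont, if_pos rfl]
      show (colD (us ++ [p])).insert _ (((colD (us ++ [p])).getD ((p.length : Int) + 1) []) ++ [x]) = _
      rw [hgd]
    rw [h1]
    refine PySem.Dict.ext ?_
    rw [PySem.Dict.items_insert_of_contains _ _ hcont]
    show List.map _ (colD (us ++ [p])).items = (colD (us ++ [p ++ [x]])).items
    have hMM : Mx (us ++ [p ++ [x]]) = Mx (us ++ [p]) := by rw [hM, hM']; omega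
    unfold colD
    rw [hMM, List.map_map]
    refine List.map_congr_left (fun i hi => ?_)
    have hmem := PySem.List.mem_pyRange_one.1 hi
    by_cases hieq : i = (p.length : Int) + 1
    · subst hieq
      simp only [beq_self_eq_true, Function.comp_apply]
      exact Prod.ext rfl (col_snoc_eq us p x).symm
    · simp only [Function.comp_apply, beq_iff_eq, hieq, if_false]
      exact Prod.ext rfl (col_snoc_ne us p x i (by omega) hieq).symm
  · -- fresh index: append at the end
    have hcont : (colD (us ++ [p])).contains ((p.length : Int) + 1) = false := by
      refine Bool.eq_false_iff.2 (fun hc => ?_)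
      have := (PySem.Dict.contains_iff_mem_keys _ _).1 hc
      rw [keys_colD] at this
      have := PySem.List.mem_pyRange_one.1 this
      rw [hM] at this
      push_cast at this
      omega
    have h1 : ins1 (colD (us ++ [p])) ((p.length : Int) + 1) x
        = (colD (us ++ [p])).insert ((p.length : Int) + 1) [x] := by
      unfold ins1
      rw [hcont]
      simp only [Bool.false_eq_true, if_false]
      show ((colD (us ++ [p])).insert _ []).insert _
          ((((colD (us ++ [p])).insert ((p.length : Int) + 1) []).getD ((p.length : Int) + 1) []) ++ [x]) = _
      rw [PySem.Dict.getD_insert_self, PySem.Dict.insert_insert_self]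
      rfl
    rw [h1]
    refine PySem.Dict.ext ?_
    rw [PySem.Dict.items_insert_of_not_contains _ _ hcont]
    show (colD (us ++ [p])).items ++ [((p.length : Int) + 1, [x])] = (colD (us ++ [p ++ [x]])).items
    unfold colD
    have e1 : (Mx (us ++ [p]) : Int) + 1 = (p.length : Int) + 1 := by rw [hM]; push_cast; omega
    have e2 : (Mx (us ++ [p ++ [x]]) : Int) + 1 = ((p.length : Int) + 1) + 1 := by
      rw [hM']; push_cast; omega
    rw [e1, e2]
    conv_rhs => rw [PySem.List.pyRange_one_succ_right (by have : (0:Int) ≤ (p.length : Int) := Int.natCast_nonneg _; omega : (1:Int) ≤ (p.length : Int) + 1),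
      List.map_append]
    congr 1
    · refine List.map_congr_left (fun i hi => ?_)
      have hmem := PySem.List.mem_pyRange_one.1 hi
      exact Prod.ext rfl (col_snoc_ne us p x i (by omega) (by omega)).symm
    · simp only [List.map_cons, List.map_nil]
      refine congrArg (fun v => [((p.length : Int) + 1, v)]) ?_
      rw [col_snoc_eq us p x, col_snoc_base us p (by omega)]
      rfl

theorem key_all (s : List Int) (us : List (List Int)) (p : List Int) :
    posF (colD (us ++ [p])) ((p.length : Int) + 1) s = colD (us ++ [p ++ s]) := by
  induction s generalizing p with
  | nil => simp [posF]
  | cons x s ih =>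
    show posF (ins1 (colD (us ++ [p])) ((p.length : Int) + 1) x) ((p.length : Int) + 1 + 1) s = _
    rw [key_step]
    have h := ih (p ++ [x])
    have e : ((p ++ [x]).length : Int) + 1 = (p.length : Int) + 1 + 1 := by simp only [List.length_append, List.length_cons, List.length_nil]; push_cast; omega
    rw [e, List.append_assoc] at h
    simpa using h

theorem colD_nil_trace (us : List (List Int)) : colD (us ++ [[]]) = colD us := by
  unfold colD
  have hM : Mx (us ++ [[]]) = Mx us := by rw [Mx_append]; simp
  rw [hM]
  congr 1
  refine List.map_congr_left (fun i hi => ?_)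
  have h1 := (PySem.List.mem_pyRange_one).1 hi
  rw [col_append_last, col_single_gt [] i (by simp; omega), List.append_nil]

theorem innerfold (cc : String) (t : List Int)
    (vals : PySem.Dict String (PySem.Dict Int (List Int))) (d : PySem.Dict Int (List Int)) (i : Int) :
    t.foldl (fun (st : PySem.Dict String (PySem.Dict Int (List Int)) × Int) feature =>
        let d0 := st.1.getD cc PySem.Dict.empty
        let d1 := if d0.contains st.2 then d0 else d0.insert st.2 []
        let d2 := d1.modify st.2 [] (fun l => l ++ [feature])
        (st.1.insert cc d2, st.2 + 1)) (vals.insert cc d, i)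
      = (vals.insert cc (posF d i t), i + t.length) := by
  induction t generalizing vals d i with
  | nil => simp [posF]
  | cons x s ih =>
    simp only [List.foldl_cons]
    have hd : (vals.insert cc d).getD cc PySem.Dict.empty = d := PySem.Dict.getD_insert_self _ _ _ _
    simp only [hd]
    have hins : (vals.insert cc d).insert cc
        ((if d.contains i then d else d.insert i []).modify i [] (fun l => l ++ [x]))
        = vals.insert cc (ins1 d i x) := PySem.Dict.insert_insert_self _ _ _ _
    rw [hins, ih]
    exact Prod.ext rfl (by simp only [List.length_cons]; push_cast; omega)

theorem perkeyA (cc : String) (coeff : List (List Int))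
    (vals : PySem.Dict String (PySem.Dict Int (List Int))) (d : PySem.Dict Int (List Int)) :
    coeff.foldl (fun vals trace =>
        (trace.foldl (fun (st : PySem.Dict String (PySem.Dict Int (List Int)) × Int) feature =>
            let d0 := st.1.getD cc PySem.Dict.empty
            let d1 := if d0.contains st.2 then d0 else d0.insert st.2 []
            let d2 := d1.modify st.2 [] (fun l => l ++ [feature])
            (st.1.insert cc d2, st.2 + 1)) (vals, (1 : Int))).1) (vals.insert cc d)
      = vals.insert cc (coeff.foldl (fun d t => posF d 1 t) d) := by
  induction coeff generalizing d with
  | nil => rfl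
  | cons t coeff ih =>
    simp only [List.foldl_cons]
    rw [innerfold cc t vals d 1]
    exact ih (posF d 1 t)

theorem rowA_eq_colD (coeff : List (List Int)) :
    coeff.foldl (fun d t => posF d 1 t) PySem.Dict.empty = colD coeff := by
  induction coeff using List.reverseRecOn with
  | nil =>
    show PySem.Dict.empty = colD []
    simp [colD, Mx, PySem.List.pyRange_one_eq_nil (le_refl (1 : Int))]
    rfl
  | append_singleton us t ih =>
    rw [List.foldl_append, List.foldl_cons, List.foldl_nil, ih]
    rw [← colD_nil_trace us]
    have h := key_all t us []
    simp only [List.length_nil, Nat.cast_zero, zero_add, List.nil_append] at h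
    exact h

theorem bodyB_eq (src : PySem.Dict String (List (List Int)))
    (vals : PySem.Dict String (PySem.Dict Int (List Int))) (p : String × List (List Int)) :
    bodyB src vals p = vals.insert p.1 (colD (src.getD p.1 [])) := by
  unfold bodyB
  have h := maxfold (src.getD p.1 []) 0
  simp only [Nat.cast_zero] at h
  rw [h]
  rfl

theorem bodyA_eq (src : PySem.Dict String (List (List Int)))
    (vals : PySem.Dict String (PySem.Dict Int (List Int))) (p : String × List (List Int))
    (h : vals.contains p.1 = false) :
    bodyA src vals p = vals.insert p.1 (colD (src.getD p.1 [])) := by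
  unfold bodyA
  simp only [h, Bool.false_eq_true, if_false]
  rw [perkeyA p.1 (src.getD p.1 []) vals PySem.Dict.empty, rowA_eq_colD]

theorem fold_eq (src : PySem.Dict String (List (List Int)))
    (l : List (String × List (List Int))) (vals : PySem.Dict String (PySem.Dict Int (List Int)))
    (hc : ∀ p ∈ l, vals.contains p.1 = false) (hnd : (l.map Prod.fst).Nodup) :
    l.foldl (bodyA src) vals = l.foldl (bodyB src) vals := by
  induction l generalizing vals with
  | nil => rfl
  | cons p l ih =>
    simp only [List.foldl_cons]
    rw [bodyA_eq src vals p (hc p List.mem_cons_self), bodyB_eq]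
    simp only [List.map_cons, List.nodup_cons] at hnd
    refine ih _ (fun q hq => ?_) hnd.2
    rw [PySem.Dict.contains_insert]
    have h1 : q.1 ≠ p.1 := by
      intro he; exact hnd.1 (he ▸ List.mem_map_of_mem hq)
    simp [h1, hc q (List.mem_cons_of_mem _ hq)]

-- ===== VERDICT (by name: the statement is the Claim_ definition above) =====
theorem getCoeff_spec : Claim_equal_getCoeff := by
  intro l _ hpre
  show getCoeff l = getCoeff_alt l
  show (l.foldl (bodyA (PySem.Dict.mk l)) PySem.Dict.empty).items.map (fun q => (q.1, q.2.items))
      = (l.foldl (bodyB (PySem.Dict.mk l)) PySem.Dict.empty).items.map (fun q => (q.1, q.2.items))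
  rw [fold_eq (PySem.Dict.mk l) l PySem.Dict.empty (fun p _ => rfl) hpre]
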